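-- pv_equiv track=rewrite | github.com/noah40povis/cs-sprint-challenge-hash-tables | hashtables/ex4/ex4.py | has_negatives
-- ===== SOURCE A (Python) =====
-- def has_negatives(a):
--     """
--     YOUR CODE HERE
--     """
--     b = {}
--     result = []
--     #for every element of a we are going to cache the key as the number and the value as the negative of that number
--     for number in a:
--         b[number] = -number
--         #
--     for number in a:
--         #for every number in a
--         if -number in b:
--             #and if that number has a negative in cache b
--             if number > 0:
--                 #and if the number in a is greater than 0(positive) add that to the results
--                 result.append(number)
--
--     return result
-- ===== SOURCE B (Python) =====
-- def has_negatives(a):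
--     # two-pointer sweep over a sorted copy finds all positive v with -v also present;
--     # a final pass over the original list keeps A's order and duplicates
--     s = sorted(a)
--     qual = set()
--     i, j = 0, len(s) - 1
--     while i < j:
--         if s[i] + s[j] == 0:
--             if s[j] > 0:
--                 qual.add(s[j])
--             i += 1
--             j -= 1
--         elif s[i] + s[j] < 0:
--             i += 1
--         else:
--             j -= 1
--     return [x for x in a if x > 0 and x in qual]
-- ===== Notes on version B (the rewrite author's own statement) =====
-- stated objective: alternative
-- what changed: Replaces the dict-cache plus hash-membership scan with a sort followed by a two-pointer sweep from both ends that collects the qualifying positive values, then a single filter pass over the original list.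
import Mathlib
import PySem

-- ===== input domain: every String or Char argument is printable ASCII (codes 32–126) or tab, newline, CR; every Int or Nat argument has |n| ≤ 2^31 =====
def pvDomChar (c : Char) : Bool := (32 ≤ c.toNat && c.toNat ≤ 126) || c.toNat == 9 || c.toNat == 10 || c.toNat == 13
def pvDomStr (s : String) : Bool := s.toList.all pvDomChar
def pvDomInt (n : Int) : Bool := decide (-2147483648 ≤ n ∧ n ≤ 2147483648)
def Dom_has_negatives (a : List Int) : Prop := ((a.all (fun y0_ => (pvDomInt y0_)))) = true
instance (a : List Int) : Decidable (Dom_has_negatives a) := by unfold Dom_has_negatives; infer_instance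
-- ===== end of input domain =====

-- B replaces A's dict-cache + hash-membership scan by a sort, a two-pointer sweep collecting the
-- qualifying positive values, and one filter pass over the original list (alternative algorithm, same results).

-- ===== PORT A =====
def has_negatives (a : List Int) : List Int :=
  let b : PySem.Dict Int Int := a.foldl (fun d number => d.insert number (-number)) PySem.Dict.empty
  a.foldl (fun result number =>
    if b.contains (-number) then
      if number > 0 then result ++ [number] else result
    else result) []

-- ===== PORT B =====
-- the while loop of Source B; s.getD i 0 is exact for Python's s[i] here: the loop only reads indices 0 ≤ i < j ≤ len s - 1
def tpLoop (s : List Int) (i j : Nat) (qual : PySem.Set Int) : PySem.Set Int :=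
  if i < j then
    if s.getD i 0 + s.getD j 0 = 0 then
      tpLoop s (i+1) (j-1) (if s.getD j 0 > 0 then PySem.Set.add qual (s.getD j 0) else qual)
    else if s.getD i 0 + s.getD j 0 < 0 then
      tpLoop s (i+1) j qual
    else
      tpLoop s i (j-1) qual
  else qual
termination_by j - i
decreasing_by all_goals omega

def has_negatives_alt (a : List Int) : List Int :=
  let s := PySem.List.sorted a (fun x => x) false
  let qual := tpLoop s 0 (s.length - 1) PySem.Set.empty
  a.filter (fun x => decide (x > 0) && PySem.Set.contains qual x)

-- ===== PRECONDITION & SPEC =====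
def Spec_has_negatives (a : List Int) (out : List Int) : Prop := out = has_negatives_alt a
instance (a : List Int) (out : List Int) : Decidable (Spec_has_negatives a out) := by unfold Spec_has_negatives; infer_instance

-- ===== CLAIM (what is proved, stated in full; the proofs are below) =====
def Claim_equal_has_negatives : Prop := ∀ (a : List Int), Dom_has_negatives a → Spec_has_negatives a (has_negatives a)

-- ===== LEMMAS AND PROOFS =====

lemma mem_tpLoop_of_mem (s : List Int) (i j : Nat) (qual : PySem.Set Int) (v : Int)
    (hv : v ∈ qual) : v ∈ tpLoop s i j qual := by
  revert hv
  induction i, j, qual using tpLoop.induct s with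
  | case1 i j qual hij ht ih =>
    intro hv
    rw [tpLoop, if_pos hij, if_pos ht]
    apply ih
    split
    · exact (PySem.Set.mem_add _ _ _).2 (Or.inl hv)
    · exact hv
  | case2 i j qual hij ht hlt ih =>
    intro hv
    rw [tpLoop, if_pos hij, if_neg ht, if_pos hlt]
    exact ih hv
  | case3 i j qual hij ht hlt ih =>
    intro hv
    rw [tpLoop, if_pos hij, if_neg ht, if_neg hlt]
    exact ih hv
  | case4 i j qual hij =>
    intro hv
    rw [tpLoop, if_neg hij]
    exact hv

lemma tpLoop_sound (s : List Int) (i j : Nat) (qual : PySem.Set Int) (v : Int)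
    (hj : j < s.length) (h : v ∈ tpLoop s i j qual) :
    v ∈ qual ∨ (0 < v ∧ v ∈ s ∧ -v ∈ s) := by
  revert hj h
  induction i, j, qual using tpLoop.induct s with
  | case1 i j qual hij ht ih =>
    intro hj h
    rw [tpLoop, if_pos hij, if_pos ht] at h
    rcases ih (by omega) h with hq | hgood
    · by_cases hpos : s.getD j 0 > 0
      · rw [dif_pos hpos] at hq
        rcases (PySem.Set.mem_add _ _ _).1 hq with hq | rfl
        · exact Or.inl hq
        · refine Or.inr ⟨hpos, ?_, ?_⟩
          · rw [List.getD_eq_getElem s 0 hj]; exact List.getElem_mem hj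
          · have : -(s.getD j 0) = s.getD i 0 := by omega
            rw [this, List.getD_eq_getElem s 0 (by omega)]
            exact List.getElem_mem (by omega)
      · rw [dif_neg hpos] at hq; exact Or.inl hq
    · exact Or.inr hgood
  | case2 i j qual hij ht hlt ih =>
    intro hj h
    rw [tpLoop, if_pos hij, if_neg ht, if_pos hlt] at h
    exact ih hj h
  | case3 i j qual hij ht hlt ih =>
    intro hj h
    rw [tpLoop, if_pos hij, if_neg ht, if_neg hlt] at h
    exact ih (by omega) h
  | case4 i j qual hij =>
    intro hj h
    rw [tpLoop, if_neg hij] at h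
    exact Or.inl h

lemma tpLoop_complete (s : List Int) (hs : s.Pairwise (· ≤ ·)) (v : Int) :
    ∀ i j qual, j < s.length → 0 < v →
    (∃ p, i ≤ p ∧ p ≤ j ∧ s[p]? = some (-v)) →
    (∃ q, i ≤ q ∧ q ≤ j ∧ s[q]? = some v) →
    v ∈ tpLoop s i j qual := by
  have hmono : ∀ p q (hp : p < s.length) (hq : q < s.length), p ≤ q → s[p] ≤ s[q] := by
    intro p q hp hq hpq
    rcases Nat.lt_or_eq_of_le hpq with h | rfl
    · exact List.pairwise_iff_getElem.1 hs p q hp hq h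
    · exact le_refl _
  intro i j qual
  induction i, j, qual using tpLoop.induct s with
  | case1 i j qual hij ht ih =>
    intro hj hv ⟨p, hip, hpj, hp⟩ ⟨q, hiq, hqj, hq⟩
    obtain ⟨hplen, hpv⟩ := List.getElem?_eq_some_iff.1 hp
    obtain ⟨hqlen, hqv⟩ := List.getElem?_eq_some_iff.1 hq
    have hilen : i < s.length := by omega
    have hgi : s.getD i 0 = s[i]'hilen := List.getD_eq_getElem s 0 hilen
    have hgj : s.getD j 0 = s[j]'hj := List.getD_eq_getElem s 0 hj
    have hsum : s[i]'hilen + s[j]'hj = 0 := by rw [← hgi, ← hgj]; exact ht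
    have hvle : v ≤ s[j]'hj := by rw [← hqv]; exact hmono q j hqlen hj hqj
    have hsj_pos : (0:Int) < s[j]'hj := lt_of_lt_of_le hv hvle
    rw [tpLoop, if_pos hij, if_pos ht]
    by_cases hveq : v = s[j]'hj
    · apply mem_tpLoop_of_mem
      rw [if_pos (show s.getD j 0 > 0 by rw [hgj]; exact hsj_pos)]
      exact (PySem.Set.mem_add _ _ _).2 (Or.inr (by rw [hgj, ← hveq]))
    · have hqi : q ≠ i := by
        intro e; simp only [e] at hqv; linarith
      have hqj' : q ≠ j := by
        intro e; simp only [e] at hqv; exact hveq hqv.symm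
      have hpi : p ≠ i := by
        intro e; simp only [e] at hpv
        exact hveq (by linarith)
      have hpj' : p ≠ j := by
        intro e; simp only [e] at hpv; linarith
      exact ih (by omega) hv ⟨p, by omega, by omega, hp⟩ ⟨q, by omega, by omega, hq⟩
  | case2 i j qual hij ht hlt ih =>
    intro hj hv ⟨p, hip, hpj, hp⟩ ⟨q, hiq, hqj, hq⟩
    obtain ⟨hplen, hpv⟩ := List.getElem?_eq_some_iff.1 hp
    obtain ⟨hqlen, hqv⟩ := List.getElem?_eq_some_iff.1 hq
    have hilen : i < s.length := by omega
    have hgi : s.getD i 0 = s[i]'hilen := List.getD_eq_getElem s 0 hilen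
    have hgj : s.getD j 0 = s[j]'hj := List.getD_eq_getElem s 0 hj
    have hsum : s[i]'hilen + s[j]'hj < 0 := by rw [← hgi, ← hgj]; exact hlt
    have hvle : v ≤ s[j]'hj := by rw [← hqv]; exact hmono q j hqlen hj hqj
    have hij_le : s[i]'hilen ≤ s[j]'hj := hmono i j hilen hj (Nat.le_of_lt hij)
    have hpi : p ≠ i := by
      intro e; simp only [e] at hpv; linarith
    have hqi : q ≠ i := by
      intro e; simp only [e] at hqv; linarith
    rw [tpLoop, if_pos hij, if_neg ht, if_pos hlt]
    exact ih hj hv ⟨p, by omega, by omega, hp⟩ ⟨q, by omega, by omega, hq⟩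
  | case3 i j qual hij ht hlt ih =>
    intro hj hv ⟨p, hip, hpj, hp⟩ ⟨q, hiq, hqj, hq⟩
    obtain ⟨hplen, hpv⟩ := List.getElem?_eq_some_iff.1 hp
    obtain ⟨hqlen, hqv⟩ := List.getElem?_eq_some_iff.1 hq
    have hilen : i < s.length := by omega
    have hgi : s.getD i 0 = s[i]'hilen := List.getD_eq_getElem s 0 hilen
    have hgj : s.getD j 0 = s[j]'hj := List.getD_eq_getElem s 0 hj
    have hsum : s[i]'hilen + s[j]'hj > 0 := by
      have h1 : ¬ (s[i]'hilen + s[j]'hj = 0) := by rw [← hgi, ← hgj]; exact ht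
      have h2 : ¬ (s[i]'hilen + s[j]'hj < 0) := by rw [← hgi, ← hgj]; exact hlt
      omega
    have hple : s[i]'hilen ≤ s[p]'hplen := hmono i p hilen hplen hip
    have hpj' : p ≠ j := by
      intro e; simp only [e] at hpv
      have := hmono i j hilen hj (Nat.le_of_lt hij)
      rw [hpv] at this; linarith
    have hqj' : q ≠ j := by
      intro e; simp only [e] at hqv; linarith
    rw [tpLoop, if_pos hij, if_neg ht, if_neg hlt]
    exact ih (by omega) hv ⟨p, by omega, by omega, hp⟩ ⟨q, by omega, by omega, hq⟩
  | case4 i j qual hij =>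
    intro hj hv ⟨p, hip, hpj, hp⟩ ⟨q, hiq, hqj, hq⟩
    have : p = q := by omega
    subst this
    rw [hp] at hq
    have : -v = v := by injection hq
    linarith


lemma mem_tpLoop_iff (a : List Int) (v : Int) :
    v ∈ tpLoop (PySem.List.sorted a (fun x => x) false) 0 (a.length - 1) ([] : PySem.Set Int) ↔
    0 < v ∧ v ∈ a ∧ -v ∈ a := by
  set s := PySem.List.sorted a (fun x => x) false with hsdef
  have hsl : s.length = a.length := PySem.List.length_sorted a _ false
  have hmem : ∀ x : Int, x ∈ s ↔ x ∈ a := fun x => PySem.List.mem_sorted a _ false x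
  have hpw : s.Pairwise (· ≤ ·) := PySem.List.sorted_pairwise a (fun x => x)
  constructor
  · intro h
    by_cases hlen : s.length = 0
    · have hnil : s = [] := List.eq_nil_of_length_eq_zero hlen
      have ha : a = [] := List.eq_nil_of_length_eq_zero (by omega)
      rw [hnil, ha, tpLoop] at h
      simp at h
    · rcases tpLoop_sound s 0 (a.length - 1) [] v (by omega) h with hq | ⟨h1, h2, h3⟩
      · exact absurd hq (List.not_mem_nil)
      · exact ⟨h1, (hmem v).1 h2, (hmem (-v)).1 h3⟩
  · rintro ⟨h1, h2, h3⟩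
    obtain ⟨q, hqlen, hqv⟩ := List.mem_iff_getElem.1 ((hmem v).2 h2)
    obtain ⟨p, hplen, hpv⟩ := List.mem_iff_getElem.1 ((hmem (-v)).2 h3)
    exact tpLoop_complete s hpw v 0 (a.length - 1) [] (by omega) h1
      ⟨p, by omega, by omega, List.getElem?_eq_some_iff.2 ⟨hplen, hpv⟩⟩
      ⟨q, by omega, by omega, List.getElem?_eq_some_iff.2 ⟨hqlen, hqv⟩⟩

lemma has_negatives_eq_alt (a : List Int) : has_negatives a = has_negatives_alt a := by
  simp only [has_negatives, has_negatives_alt]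
  have hb : ∀ n : Int,
      (a.foldl (fun d number => d.insert number (-number)) (PySem.Dict.empty : PySem.Dict Int Int)).contains n
      = decide (n ∈ a) := by
    intro n
    have hiff : (a.foldl (fun d number => d.insert number (-number)) (PySem.Dict.empty : PySem.Dict Int Int)).contains n = true ↔ n ∈ a := by
      rw [PySem.Dict.contains_iff_mem_keys, PySem.Dict.keys_foldl_insert]
      exact PySem.Set.mem_ofList a n
    by_cases hm : n ∈ a
    · simp [hm, hiff.2 hm]
    · simp only [hm, decide_false]
      rw [Bool.eq_false_iff]
      intro hc
      exact hm (hiff.1 hc)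
  -- turn A's nested ifs into a single guarded append
  have hfun : (fun (result : List Int) number =>
        if (a.foldl (fun d number => d.insert number (-number)) (PySem.Dict.empty : PySem.Dict Int Int)).contains (-number) then
          if number > 0 then result ++ [number] else result
        else result)
      = (fun result number =>
          if ((-number) ∈ a && decide (number > 0) : Bool) then result ++ [number] else result) := by
    funext r n
    rw [hb]
    by_cases h1 : (-n) ∈ a <;> by_cases h2 : n > 0 <;> simp [h1, h2]
  rw [hfun]
  have := PySem.List.foldl_append_if (fun n : Int => ((-n) ∈ a && decide (n > 0) : Bool)) (fun n => n) a []
  simp only [List.map_id'] at this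
  rw [this, List.nil_append]
  apply List.filter_congr
  intro x hx
  have hq := mem_tpLoop_iff a x
  by_cases h2 : x > 0
  · by_cases h1 : (-x) ∈ a
    · simp [h1, h2]
      exact hq.2 ⟨h2, hx, h1⟩
    · simp [h1, h2]
      intro hc
      exact h1 (hq.1 hc).2.2
  · simp [h2]

-- ===== VERDICT (by name: the statement is the Claim_ definition above) =====
theorem has_negatives_spec : Claim_equal_has_negatives := by
  intro a _
  exact has_negatives_eq_alt a
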